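-- pv_equiv track=rewrite | github.com/ellipakbaz-pixel/rag | call_tree_builder.py | _basic_statistics
-- ===== SOURCE A (Python) =====
-- from typing import List, Dict, Set, Tuple, Any
--
-- def _basic_statistics(call_trees: List[Dict]) -> Dict:
--     """Basic statistics"""
--     stats = {
--         'total_functions': len(call_trees),
--         'functions_with_upstream': 0,
--         'functions_with_downstream': 0,
--         'max_upstream_count': 0,
--         'max_downstream_count': 0,
--         'isolated_functions': 0
--     }
--
--     for tree in call_trees:
--         upstream_count = tree.get('upstream_count', 0)
--         downstream_count = tree.get('downstream_count', 0)
--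
--         if upstream_count > 0:
--             stats['functions_with_upstream'] += 1
--             stats['max_upstream_count'] = max(stats['max_upstream_count'], upstream_count)
--
--         if downstream_count > 0:
--             stats['functions_with_downstream'] += 1
--             stats['max_downstream_count'] = max(stats['max_downstream_count'], downstream_count)
--
--         if upstream_count == 0 and downstream_count == 0:
--             stats['isolated_functions'] += 1
--
--     return stats
-- ===== SOURCE B (Python) =====
-- def _basic_statistics(call_trees):
--     """Basic statistics, recomputed as independent aggregate passes."""
--     ups = [tree.get('upstream_count', 0) for tree in call_trees]
--     downs = [tree.get('downstream_count', 0) for tree in call_trees]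
--     return {
--         'total_functions': len(call_trees),
--         'functions_with_upstream': sum(1 for c in ups if c > 0),
--         'functions_with_downstream': sum(1 for c in downs if c > 0),
--         'max_upstream_count': max((c for c in ups if c > 0), default=0),
--         'max_downstream_count': max((c for c in downs if c > 0), default=0),
--         'isolated_functions': sum(1 for u, d in zip(ups, downs) if u == 0 and d == 0),
--     }
-- ===== Notes on version B (the rewrite author's own statement) =====
-- stated objective: simpler
-- what changed: The single fused loop mutating a six-field stats dict is replaced by two projection lists (ups/downs) and six independent aggregate expressions (len, conditional counts, max with default, zip count) assembled into the dict at the end.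
import Mathlib
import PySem

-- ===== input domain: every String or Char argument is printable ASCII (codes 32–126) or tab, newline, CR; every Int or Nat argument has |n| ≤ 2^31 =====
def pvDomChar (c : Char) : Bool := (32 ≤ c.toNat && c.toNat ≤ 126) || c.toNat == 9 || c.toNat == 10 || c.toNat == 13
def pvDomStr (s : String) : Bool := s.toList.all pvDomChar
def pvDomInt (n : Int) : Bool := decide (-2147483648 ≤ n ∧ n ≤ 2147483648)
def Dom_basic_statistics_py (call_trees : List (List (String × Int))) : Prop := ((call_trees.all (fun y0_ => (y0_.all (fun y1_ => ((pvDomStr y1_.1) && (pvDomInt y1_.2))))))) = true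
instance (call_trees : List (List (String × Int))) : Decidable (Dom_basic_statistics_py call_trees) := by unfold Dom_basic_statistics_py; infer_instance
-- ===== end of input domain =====

-- B replaces A's single fused accumulator loop with independent aggregate passes (counts, filtered max, zip count); objective: simpler.


-- ===== PORT A =====
-- one loop step of A's 'for tree in call_trees' body, mutating the stats dict in place
def pvStepA (stats : PySem.Dict String Int) (tree : List (String × Int)) : PySem.Dict String Int :=
  let upstream_count := (PySem.Dict.mk tree).getD "upstream_count" 0
  let downstream_count := (PySem.Dict.mk tree).getD "downstream_count" 0
  let stats :=
    if upstream_count > 0 then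
      ((stats.modify "functions_with_upstream" 0 (· + 1)).modify "max_upstream_count" 0
        (fun m => max m upstream_count))
    else stats
  let stats :=
    if downstream_count > 0 then
      ((stats.modify "functions_with_downstream" 0 (· + 1)).modify "max_downstream_count" 0
        (fun m => max m downstream_count))
    else stats
  if upstream_count = 0 ∧ downstream_count = 0 then
    stats.modify "isolated_functions" 0 (· + 1)
  else stats

def basic_statistics_py (call_trees : List (List (String × Int))) : List (String × Int) :=
  let stats : PySem.Dict String Int := PySem.Dict.mk
    [("total_functions", (call_trees.length : Int)),
     ("functions_with_upstream", 0),
     ("functions_with_downstream", 0),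
     ("max_upstream_count", 0),
     ("max_downstream_count", 0),
     ("isolated_functions", 0)]
  (call_trees.foldl pvStepA stats).items

-- ===== PORT B =====
def basic_statistics_py_alt (call_trees : List (List (String × Int))) : List (String × Int) :=
  let ups := call_trees.map (fun tree => (PySem.Dict.mk tree).getD "upstream_count" 0)
  let downs := call_trees.map (fun tree => (PySem.Dict.mk tree).getD "downstream_count" 0)
  [("total_functions", (call_trees.length : Int)),
   ("functions_with_upstream", ((ups.countP (fun c => c > 0)) : Int)),
   ("functions_with_downstream", ((downs.countP (fun c => c > 0)) : Int)),
   ("max_upstream_count", PySem.List.maxD (ups.filter (fun c => c > 0)) (fun c => c) 0),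
   ("max_downstream_count", PySem.List.maxD (downs.filter (fun c => c > 0)) (fun c => c) 0),
   ("isolated_functions", (((ups.zip downs).countP (fun p => p.1 == 0 && p.2 == 0)) : Int))]

-- ===== PRECONDITION & SPEC =====
def Spec_basic_statistics_py (call_trees : List (List (String × Int))) (out : List (String × Int)) : Prop := out = basic_statistics_py_alt call_trees
instance (call_trees : List (List (String × Int))) (out : List (String × Int)) : Decidable (Spec_basic_statistics_py call_trees out) := by unfold Spec_basic_statistics_py; infer_instance

-- ===== CLAIM (what is proved, stated in full; the proofs are below) =====
def Claim_equal_basic_statistics_py : Prop := ∀ (call_trees : List (List (String × Int))), Dom_basic_statistics_py call_trees → Spec_basic_statistics_py call_trees (basic_statistics_py call_trees)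

-- ===== LEMMAS AND PROOFS =====

-- A's tree.get('upstream_count', 0) / ...('downstream_count', 0), shared by both invariant statements
def pvUp (tree : List (String × Int)) : Int := (PySem.Dict.mk tree).getD "upstream_count" 0
def pvDown (tree : List (String × Int)) : Int := (PySem.Dict.mk tree).getD "downstream_count" 0

-- the whole of A's loop, run from a symbolic six-field stats dict
set_option maxHeartbeats 2000000 in
lemma pvLoopA (l : List (List (String × Int))) (tot a b c d e : Int) :
    (l.foldl pvStepA (PySem.Dict.mk
      [("total_functions", tot), ("functions_with_upstream", a), ("functions_with_downstream", b),
       ("max_upstream_count", c), ("max_downstream_count", d), ("isolated_functions", e)])).items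
    = [("total_functions", tot),
       ("functions_with_upstream", a + (((l.map pvUp).countP (fun x => decide (x > 0))) : Int)),
       ("functions_with_downstream", b + (((l.map pvDown).countP (fun x => decide (x > 0))) : Int)),
       ("max_upstream_count", ((l.map pvUp).filter (fun x => decide (x > 0))).foldl max c),
       ("max_downstream_count", ((l.map pvDown).filter (fun x => decide (x > 0))).foldl max d),
       ("isolated_functions", e + ((((l.map pvUp).zip (l.map pvDown)).countP (fun p => p.1 == 0 && p.2 == 0)) : Int))] := by
  induction l generalizing a b c d e with
  | nil => simp
  | cons t l ih =>
    have hstep : pvStepA (PySem.Dict.mk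
        [("total_functions", tot), ("functions_with_upstream", a), ("functions_with_downstream", b),
         ("max_upstream_count", c), ("max_downstream_count", d), ("isolated_functions", e)]) t
      = PySem.Dict.mk
        [("total_functions", tot),
         ("functions_with_upstream", if pvUp t > 0 then a + 1 else a),
         ("functions_with_downstream", if pvDown t > 0 then b + 1 else b),
         ("max_upstream_count", if pvUp t > 0 then max c (pvUp t) else c),
         ("max_downstream_count", if pvDown t > 0 then max d (pvDown t) else d),
         ("isolated_functions", if pvUp t = 0 ∧ pvDown t = 0 then e + 1 else e)] := by
      simp only [pvStepA, pvUp, pvDown]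
      split_ifs <;> simp_all [PySem.Dict.modify, PySem.Dict.insert, PySem.Dict.getD, PySem.Dict.get?, PySem.Dict.contains]
    simp only [List.foldl_cons, hstep, ih, List.map_cons, List.zip_cons_cons,
      List.countP_cons, List.filter_cons]
    split_ifs <;> simp_all <;> omega

-- max((c for c in xs if c>0), default=0) equals the running max from 0 when all kept elements are positive
lemma pvMaxD_pos (xs : List Int) (h : ∀ x ∈ xs, 0 < x) :
    PySem.List.maxD xs (fun y => y) 0 = xs.foldl max 0 := by
  cases xs with
  | nil => rfl
  | cons x t =>
    have hx : max 0 x = x := by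
      have := h x (List.mem_cons_self ..)
      omega
    simp [PySem.List.maxD, PySem.List.max?_id_cons, List.foldl_cons, hx]

-- ===== VERDICT (by name: the statement is the Claim_ definition above) =====
theorem basic_statistics_py_spec : Claim_equal_basic_statistics_py := by
  intro call_trees _
  unfold Spec_basic_statistics_py basic_statistics_py basic_statistics_py_alt
  rw [pvLoopA]
  have hmax : ∀ (f : List (String × Int) → Int),
      PySem.List.maxD ((call_trees.map f).filter (fun x => decide (x > 0))) (fun y => y) 0
        = ((call_trees.map f).filter (fun x => decide (x > 0))).foldl max 0 := by
    intro f
    apply pvMaxD_pos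
    intro x hx
    have := (List.mem_filter.mp hx).2
    simpa using this
  simp only [hmax]
  unfold pvUp pvDown
  simp
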